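-- pv_equiv track=rewrite | github.com/NhuongNhuong0206/GiauVanBan | Encode.py | create_ascii_2d_array
-- ===== SOURCE A (Python) =====
-- def create_ascii_2d_array(ascii_array, k):
--     ascii_2d_array = []
--     old = 0
--     cnt = 0
--     for i in range(len(ascii_array)):
--         if (ascii_array[i] == 32):
--             cnt += 1
--         if cnt == k or i == len(ascii_array) - 1:
--             ascii_2d_array.append(ascii_array[old:i+1])
--             old = i+1
--             cnt = 0
--     return ascii_2d_array
-- ===== SOURCE B (Python) =====
-- def _every_kth(xs, k):
--     """Every k-th element of xs (k >= 1)."""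
--     if len(xs) < k:
--         return []
--     return [xs[k - 1]] + _every_kth(xs[k:], k)
--
--
-- def create_ascii_2d_array(ascii_array, k):
--     spaces = [i for i, v in enumerate(ascii_array) if v == 32]
--     cuts = _every_kth(spaces, k) if k > 0 else []
--     chunks = []
--     old = 0
--     for c in cuts:
--         chunks.append(ascii_array[old:c + 1])
--         old = c + 1
--     if old < len(ascii_array):
--         chunks.append(ascii_array[old:])
--     return chunks
-- ===== Notes on version B (the rewrite author's own statement) =====
-- stated objective: alternative
-- what changed: B first collects the list of space positions in one pass, takes every k-th of them as cut indices (none for k <= 0), and materialises the chunks purely from these precomputed boundaries, instead of A's single interleaved index loop with a running space counter.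
-- intended difference: For k == 0 on arrays of length >= 2 whose first element is not a space, A returns an accidental mix of one-element chunks up to the first space followed by the remainder (its counter is 0 only until the first space), while B returns the whole array as a single chunk, the intended meaning of 'cut after every 0th space', i.e. never cut. — e.g. on create_ascii_2d_array([0, 0], 0): A returns [[0], [0]], B returns [[0, 0]]
import Mathlib
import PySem

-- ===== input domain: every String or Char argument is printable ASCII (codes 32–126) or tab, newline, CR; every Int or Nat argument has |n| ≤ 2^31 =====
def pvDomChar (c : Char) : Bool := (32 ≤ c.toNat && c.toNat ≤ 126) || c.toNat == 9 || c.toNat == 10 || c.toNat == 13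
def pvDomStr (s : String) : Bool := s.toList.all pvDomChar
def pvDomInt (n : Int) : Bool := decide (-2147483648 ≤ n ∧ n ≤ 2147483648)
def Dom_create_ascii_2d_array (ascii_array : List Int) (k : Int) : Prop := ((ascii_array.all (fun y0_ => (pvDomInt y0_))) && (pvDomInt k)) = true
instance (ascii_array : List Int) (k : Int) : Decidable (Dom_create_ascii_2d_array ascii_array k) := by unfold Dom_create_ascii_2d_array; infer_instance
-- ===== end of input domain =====

-- B precomputes the space positions and cuts at every k-th of them (a boundary-based
-- decomposition instead of A's interleaved counter loop; same asymptotic cost); on the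
-- degenerate k = 0 inputs of D_ below B intentionally returns the whole array as one chunk.

-- ===== PORT A =====
-- the body of A's 'for i in range(len(ascii_array))' loop; state = (ascii_2d_array, old, cnt)
def stepA (a : List Int) (k : Int) (st : List (List Int) × Int × Int) (i : Int) :
    List (List Int) × Int × Int :=
  let cnt' := if PySem.List.pyGetD a i 0 = 32 then st.2.2 + 1 else st.2.2
  if cnt' = k ∨ i = (a.length : Int) - 1 then
    (st.1 ++ [PySem.List.slice a (some st.2.1) (some (i + 1))], (i + 1, 0))
  else
    (st.1, (st.2.1, cnt'))

def create_ascii_2d_array (ascii_array : List Int) (k : Int) : List (List Int) :=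
  ((PySem.List.pyRange 0 (ascii_array.length : Int) 1).foldl (stepA ascii_array k)
    ([], (0, 0))).1

-- ===== PORT B =====
-- helper _every_kth of Source B: every k-th element of the list; the 'k ≤ 0' disjunct of the
-- guard only makes the recursion well-founded in Lean (Source B calls it with k ≥ 1 only)
def everyKth (spaces : List Int) (k : Int) : List Int :=
  if h : (spaces.length : Int) < k ∨ k ≤ 0 then []
  else
    PySem.List.pyGetD spaces (k - 1) 0 :: everyKth (PySem.List.slice spaces (some k) none) k
termination_by spaces.length
decreasing_by
  simp only [PySem.List.slice_from spaces (by omega : (0:Int) ≤ k), List.length_drop]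
  omega

-- the comprehension '[i for i, v in enumerate(ascii_array) if v == 32]'
def spacesOf (a : List Int) : List Int :=
  ((PySem.List.enumerate a 0).filter (fun p => p.2 == 32)).map Prod.fst

-- the body of Source B's 'for c in cuts' loop; state = (chunks, old)
def stepB (a : List Int) (st : List (List Int) × Int) (c : Int) : List (List Int) × Int :=
  (st.1 ++ [PySem.List.slice a (some st.2) (some (c + 1))], c + 1)

def create_ascii_2d_array_alt (ascii_array : List Int) (k : Int) : List (List Int) :=
  let spaces := spacesOf ascii_array
  let cuts : List Int := if 0 < k then everyKth spaces k else []
  let st := cuts.foldl (stepB ascii_array) ([], 0)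
  if st.2 < (ascii_array.length : Int) then
    st.1 ++ [PySem.List.slice ascii_array (some st.2) none]
  else st.1

-- ===== PRECONDITION & SPEC =====
-- For k == 0 on arrays of length >= 2 whose first element is not a space, A returns an
-- accidental mix of one-element chunks up to the first space followed by the remainder
-- (its counter is 0 only until the first space), while B returns the whole array as a
-- single chunk, the intended meaning of 'cut after every 0th space', i.e. never cut.
def D_create_ascii_2d_array (ascii_array : List Int) (k : Int) : Prop :=
  k = 0 ∧ 2 ≤ ascii_array.length ∧ ascii_array.headD 0 ≠ 32
instance (ascii_array : List Int) (k : Int) : Decidable (D_create_ascii_2d_array ascii_array k) := by unfold D_create_ascii_2d_array; infer_instance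

def Spec_create_ascii_2d_array (ascii_array : List Int) (k : Int) (out : List (List Int)) : Prop := ¬ D_create_ascii_2d_array ascii_array k → out = create_ascii_2d_array_alt ascii_array k
instance (ascii_array : List Int) (k : Int) (out : List (List Int)) : Decidable (Spec_create_ascii_2d_array ascii_array k out) := by unfold Spec_create_ascii_2d_array; infer_instance

def pvDiffWitness_create_ascii_2d_array : List Int × Int := ([0, 0], 0)
def pvDiffWitnessOut_create_ascii_2d_array : (List (List Int)) × (List (List Int)) :=
  ([[0], [0]], [[0, 0]])

-- ===== CLAIM (what is proved, stated in full; the proofs are below) =====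
def Claim_unchanged_create_ascii_2d_array : Prop := ∀ (ascii_array : List Int) (k : Int), Dom_create_ascii_2d_array ascii_array k → Spec_create_ascii_2d_array ascii_array k (create_ascii_2d_array ascii_array k)
def Claim_changed_create_ascii_2d_array : Prop := Dom_create_ascii_2d_array (pvDiffWitness_create_ascii_2d_array.1) (pvDiffWitness_create_ascii_2d_array.2) ∧ D_create_ascii_2d_array (pvDiffWitness_create_ascii_2d_array.1) (pvDiffWitness_create_ascii_2d_array.2) ∧ create_ascii_2d_array (pvDiffWitness_create_ascii_2d_array.1) (pvDiffWitness_create_ascii_2d_array.2) = pvDiffWitnessOut_create_ascii_2d_array.1 ∧ create_ascii_2d_array_alt (pvDiffWitness_create_ascii_2d_array.1) (pvDiffWitness_create_ascii_2d_array.2) = pvDiffWitnessOut_create_ascii_2d_array.2 ∧ pvDiffWitnessOut_create_ascii_2d_array.1 ≠ pvDiffWitnessOut_create_ascii_2d_array.2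
def Claim_exact_create_ascii_2d_array : Prop := ∀ (ascii_array : List Int) (k : Int), Dom_create_ascii_2d_array ascii_array k → D_create_ascii_2d_array ascii_array k → create_ascii_2d_array ascii_array k ≠ create_ascii_2d_array_alt ascii_array k

-- ===== LEMMAS AND PROOFS =====

-- A's loop, re-expressed as a structural recursion on the unprocessed suffix:
-- pend = elements since the last cut, cnt = spaces since the last cut.
def goA (k : Int) : List Int → List Int → Int → List (List Int)
  | [], _, _ => []
  | x :: xs, pend, cnt =>
    let c := if x = 32 then cnt + 1 else cnt
    if c = k ∨ xs = [] then (pend ++ [x]) :: goA k xs [] 0 else goA k xs (pend ++ [x]) c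

lemma loopA (a : List Int) (k : Int) :
    ∀ (s done pend : List Int) (acc : List (List Int)) (cnt : Int),
    a = done ++ (pend ++ s) →
    ((PySem.List.pyRange ((done.length + pend.length : Nat) : Int) (a.length : Int) 1).foldl
        (stepA a k) (acc, (((done.length : Nat) : Int), cnt))).1
      = acc ++ goA k s pend cnt := by
  intro s
  induction s with
  | nil =>
    intro done pend acc cnt ha
    have hl : (a.length : Int) ≤ ((done.length + pend.length : Nat) : Int) := by
      subst ha; simp
    rw [PySem.List.pyRange_one_eq_nil hl]
    simp [goA]
  | cons x xs ih =>
    intro done pend acc cnt ha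
    have hlen : a.length = done.length + pend.length + (xs.length + 1) := by
      subst ha; simp; omega
    have hlt : ((done.length + pend.length : Nat) : Int) < (a.length : Int) := by
      have : done.length + pend.length < a.length := by omega
      exact_mod_cast this
    rw [PySem.List.pyRange_one_cons hlt, List.foldl_cons]
    have hget : PySem.List.pyGetD a ((done.length + pend.length : Nat) : Int) 0 = x := by
      rw [PySem.List.pyGetD_natCast, ha, ← List.append_assoc,
          show done.length + pend.length = (done ++ pend).length by simp]
      simp [List.getD]
    simp only [stepA, hget]
    have hor : (((done.length + pend.length : Nat) : Int) = (a.length : Int) - 1) ↔ xs = [] := by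
      rw [← List.length_eq_zero_iff]
      constructor <;> intro h' <;> omega
    simp only [goA]
    have hcast : (((done.length + pend.length : Nat) : Int) + 1)
        = ((done.length + pend.length + 1 : Nat) : Int) := by push_cast; ring
    have hCiff : (((if x = 32 then cnt + 1 else cnt) = k)
          ∨ ((done.length + pend.length : Nat) : Int) = (a.length : Int) - 1)
        ↔ (((if x = 32 then cnt + 1 else cnt) = k) ∨ xs = []) := or_congr Iff.rfl hor
    by_cases hC : ((if x = 32 then cnt + 1 else cnt) = k) ∨ xs = []
    · rw [if_pos (hCiff.mpr hC), if_pos hC]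
      have hslice : PySem.List.slice a (some ((done.length : Nat) : Int))
          (some (((done.length + pend.length : Nat) : Int) + 1)) = pend ++ [x] := by
        rw [hcast, PySem.List.slice_natCast, ha, List.drop_left]
        rw [show done.length + pend.length + 1 - done.length = pend.length + 1 by omega]
        rw [List.take_length_add_append]
        simp
      rw [hslice]
      have ih' := ih (done ++ pend ++ [x]) [] (acc ++ [pend ++ [x]]) 0 (by rw [ha]; simp)
      rw [show ((done ++ pend ++ [x]).length + ([] : List Int).length : Nat)
            = done.length + pend.length + 1 by simp; omega,
          show ((done ++ pend ++ [x]).length : Nat) = done.length + pend.length + 1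
            by simp; omega] at ih'
      rw [hcast, ih']
      simp
    · rw [if_neg (fun h => hC (hCiff.mp h)), if_neg hC]
      have ih' := ih done (pend ++ [x]) acc (if x = 32 then cnt + 1 else cnt)
        (by rw [ha]; simp)
      rw [show (done.length + (pend ++ [x]).length : Nat)
            = done.length + pend.length + 1 by simp; omega] at ih'
      rw [hcast, ih']

lemma A_eq_goA (a : List Int) (k : Int) :
    create_ascii_2d_array a k = goA k a [] 0 := by
  have h := loopA a k a [] [] [] 0 (by simp)
  simpa [create_ascii_2d_array] using h

-- spaces-list basics
lemma enumerate_shift (xs : List Int) : ∀ (s : Int),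
    PySem.List.enumerate xs (s + 1) = (PySem.List.enumerate xs s).map (fun p => (p.1 + 1, p.2)) := by
  induction xs with
  | nil => intro s; simp [PySem.List.enumerate_nil]
  | cons x xs ih =>
    intro s
    rw [PySem.List.enumerate_cons, PySem.List.enumerate_cons]
    simp [ih (s + 1)]

lemma spacesOf_cons (x : Int) (xs : List Int) :
    spacesOf (x :: xs) = (if x = 32 then [(0:Int)] else []) ++ (spacesOf xs).map (· + 1) := by
  unfold spacesOf
  rw [PySem.List.enumerate_cons, show (0:Int) + 1 = 0 + 1 from rfl, enumerate_shift]
  simp [List.filter_map, List.filter_cons, Function.comp_def]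
  split_ifs <;> simp_all

lemma spacesOf_append (u v : List Int) :
    spacesOf (u ++ v) = spacesOf u ++ (spacesOf v).map (· + (u.length : Int)) := by
  induction u with
  | nil => simp [spacesOf]
  | cons x u ih =>
    rw [List.cons_append, spacesOf_cons, spacesOf_cons, ih]
    simp only [List.map_append, List.map_map, List.append_assoc, List.length_cons]
    congr 2
    apply List.map_congr_left
    intro i _
    simp [Function.comp]
    ring

lemma length_spacesOf (a : List Int) :
    (spacesOf a).length = a.countP (fun x => x == 32) := by
  induction a with
  | nil => simp [spacesOf]
  | cons x xs ih =>
    rw [spacesOf_cons, List.countP_cons]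
    simp only [List.length_append, List.length_map, ih]
    split_ifs <;> simp_all <;> omega

lemma spacesOf_nonneg (a : List Int) : ∀ i ∈ spacesOf a, 0 ≤ i := by
  induction a with
  | nil => simp [spacesOf]
  | cons x xs ih =>
    rw [spacesOf_cons]
    intro i hi
    rcases List.mem_append.mp hi with h | h
    · split_ifs at h <;> simp_all
    · rcases List.mem_map.mp h with ⟨j, hj, rfl⟩
      have := ih j hj
      omega

-- everyKth basics
lemma everyKth_short (s : List Int) (k : Int) (h : (s.length : Int) < k) :
    everyKth s k = [] := by
  rw [everyKth]
  exact dif_pos (Or.inl h)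

lemma everyKth_step (s : List Int) (k : Int) (h1 : 0 < k) (h2 : k ≤ (s.length : Int)) :
    everyKth s k = PySem.List.pyGetD s (k - 1) 0 :: everyKth (s.drop k.toNat) k := by
  rw [everyKth, dif_neg (by omega)]
  rw [PySem.List.slice_from s (by omega : (0:Int) ≤ k)]

lemma everyKth_mem (s : List Int) (k : Int) : ∀ x ∈ everyKth s k, x ∈ s := by
  induction hn : s.length using Nat.strong_induction_on generalizing s with
  | _ n ih =>
  subst hn
  by_cases h : (s.length : Int) < k ∨ k ≤ 0
  · rw [everyKth, dif_pos h]; simp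
  · rw [everyKth_step s k (by omega) (by omega)]
    intro x hx
    rcases List.mem_cons.mp hx with rfl | hx
    · rw [PySem.List.pyGetD_of_nonneg s 0 (by omega : (0:Int) ≤ k - 1)]
      have hlt : (k - 1).toNat < s.length := by omega
      rw [List.getD_eq_getElem s 0 hlt]
      exact List.getElem_mem hlt
    · have hxs : x ∈ s.drop k.toNat :=
        ih (s.drop k.toNat).length (by simp; omega) _ rfl x hx
      exact List.mem_of_mem_drop hxs

lemma everyKth_map_add (k c : Int) : ∀ (s : List Int),
    everyKth (s.map (· + c)) k = (everyKth s k).map (· + c) := by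
  intro s
  induction hn : s.length using Nat.strong_induction_on generalizing s with
  | _ n ih =>
  subst hn
  by_cases h : (s.length : Int) < k ∨ k ≤ 0
  · rw [everyKth, dif_pos (by simpa using h), everyKth, dif_pos h]
    simp
  · have h1 : 0 < k := by omega
    have h2 : k ≤ (s.length : Int) := by omega
    rw [everyKth_step s k h1 h2,
        everyKth_step (s.map (· + c)) k (by omega) (by simpa using h2)]
    have hget : PySem.List.pyGetD (s.map (· + c)) (k - 1) 0
        = PySem.List.pyGetD s (k - 1) 0 + c := by
      rw [PySem.List.pyGetD_of_nonneg _ _ (by omega : (0:Int) ≤ k - 1),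
          PySem.List.pyGetD_of_nonneg _ _ (by omega : (0:Int) ≤ k - 1)]
      have hlt : (k - 1).toNat < s.length := by omega
      rw [List.getD_eq_getElem _ _ (by simpa using hlt), List.getD_eq_getElem s _ hlt]
      simp
    rw [hget, ← List.map_drop]
    rw [ih (s.drop k.toNat).length (by simp; omega) _ rfl]
    simp

-- stepB-fold basics
lemma foldB_acc (cuts : List Int) (a : List Int) : ∀ (acc : List (List Int)) (old : Int),
    cuts.foldl (stepB a) (acc, old)
      = (acc ++ (cuts.foldl (stepB a) ([], old)).1, (cuts.foldl (stepB a) ([], old)).2) := by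
  induction cuts with
  | nil => simp
  | cons c cs ih =>
    intro acc old
    rw [List.foldl_cons, List.foldl_cons]
    rw [show stepB a (acc, old) c
        = (acc ++ [PySem.List.slice a (some old) (some (c + 1))], c + 1) from rfl,
        show stepB a (([] : List (List Int)), old) c
        = ([PySem.List.slice a (some old) (some (c + 1))], c + 1) by simp [stepB]]
    rw [ih, ih [PySem.List.slice a (some old) (some (c + 1))] (c + 1)]
    simp

lemma foldB_old_nonneg (cuts : List Int) (a : List Int) :
    ∀ (acc : List (List Int)) (old : Int), 0 ≤ old → (∀ c ∈ cuts, 0 ≤ c) →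
    0 ≤ (cuts.foldl (stepB a) (acc, old)).2 := by
  induction cuts with
  | nil => intro acc old h _; simpa using h
  | cons c cs ih =>
    intro acc old h hc
    rw [List.foldl_cons]
    exact ih _ (c + 1) (by have := hc c (by simp); omega) (fun d hd => hc d (by simp [hd]))

lemma slice_shift (p v : List Int) (x y : Int) (hx : 0 ≤ x) (hy : 0 ≤ y) :
    PySem.List.slice (p ++ v) (some ((p.length : Int) + x)) (some ((p.length : Int) + y))
      = PySem.List.slice v (some x) (some y) := by
  rw [PySem.List.slice_toNat _ (by omega) (by omega),
      PySem.List.slice_toNat _ hx hy]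
  have h1 : ((p.length : Int) + x).toNat = p.length + x.toNat := by omega
  have h2 : ((p.length : Int) + y).toNat = p.length + y.toNat := by omega
  rw [h1, h2, List.drop_length_add_append]
  congr 1
  omega

lemma foldB_shift (p v : List Int) : ∀ (cuts : List Int) (old : Int), 0 ≤ old →
    (∀ c ∈ cuts, 0 ≤ c) →
    (cuts.map (· + (p.length : Int))).foldl (stepB (p ++ v)) ([], (p.length : Int) + old)
      = ((cuts.foldl (stepB v) ([], old)).1,
         (p.length : Int) + (cuts.foldl (stepB v) ([], old)).2) := by
  intro cuts
  induction cuts with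
  | nil => intro old _ _; simp
  | cons c cs ih =>
    intro old hold hc
    have hc0 : (0:Int) ≤ c := hc c (by simp)
    rw [List.map_cons, List.foldl_cons, List.foldl_cons]
    have hstep : stepB (p ++ v) (([] : List (List Int)), (p.length : Int) + old) (c + (p.length : Int))
        = ([PySem.List.slice v (some old) (some (c + 1))], (p.length : Int) + (c + 1)) := by
      simp only [stepB]
      rw [show c + (p.length : Int) + 1 = (p.length : Int) + (c + 1) by ring,
          slice_shift p v old (c + 1) hold (by omega)]
      rfl
    rw [hstep]
    rw [show stepB v (([] : List (List Int)), old) c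
        = ([PySem.List.slice v (some old) (some (c + 1))], c + 1) by simp [stepB]]
    rw [foldB_acc, foldB_acc cs v [PySem.List.slice v (some old) (some (c + 1))] (c + 1)]
    rw [show ((cs.map (· + (p.length : Int))).foldl (stepB (p ++ v))
          (([] : List (List Int)), (p.length : Int) + (c + 1)))
        = ((cs.foldl (stepB v) ([], c + 1)).1, (p.length : Int) + (cs.foldl (stepB v) ([], c + 1)).2)
        from ih (c + 1) (by omega) (fun d hd => hc d (by simp [hd]))]

lemma foldB_shift0 (p v : List Int) (cuts : List Int) (hc : ∀ c ∈ cuts, 0 ≤ c) :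
    (cuts.map (· + (p.length : Int))).foldl (stepB (p ++ v)) ([], (p.length : Int))
      = ((cuts.foldl (stepB v) ([], 0)).1,
         (p.length : Int) + (cuts.foldl (stepB v) ([], 0)).2) := by
  have := foldB_shift p v cuts 0 le_rfl hc
  simpa using this

-- goA characterisations
lemma goA_nocut (k : Int) : ∀ (a pend : List Int) (cnt : Int),
    (k < cnt ∨ cnt + (a.countP (fun x => x == 32) : Int) < k) →
    goA k a pend cnt = if a = [] then [] else [pend ++ a] := by
  intro a
  induction a with
  | nil => intro pend cnt _; simp [goA]
  | cons x xs ih =>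
    intro pend cnt h
    rw [List.countP_cons] at h
    push_cast at h
    simp only [goA]
    have hc : ¬ ((if x = 32 then cnt + 1 else cnt) = k) := by
      split_ifs at h ⊢ <;> first | omega | simp_all
    by_cases hxs : xs = []
    · subst hxs
      rw [if_pos (Or.inr rfl)]
      simp [goA]
    · rw [if_neg (by simp [hc, hxs])]
      rw [ih (pend ++ [x]) _ (by split_ifs at h ⊢ <;> first | omega | simp_all)]
      simp [hxs]

lemma goA_cut (k : Int) : ∀ (u w pend : List Int) (cnt : Int),
    cnt + (u.countP (fun x => x == 32) : Int) = k - 1 →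
    goA k (u ++ 32 :: w) pend cnt = (pend ++ u ++ [32]) :: goA k w [] 0 := by
  intro u
  induction u with
  | nil =>
    intro w pend cnt h
    simp only [List.countP_nil, Nat.cast_zero, add_zero] at h
    simp only [List.nil_append, goA]
    rw [if_pos (Or.inl (by simp; omega))]
    simp
  | cons x u ih =>
    intro w pend cnt h
    rw [List.countP_cons] at h
    push_cast at h
    rw [List.cons_append]
    simp only [goA]
    have hc : ¬ ((if x = 32 then cnt + 1 else cnt) = k) := by
      split_ifs at h ⊢ <;> first | omega | simp_all
    rw [if_neg (by simp [hc])]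
    rw [ih w (pend ++ [x]) _ (by split_ifs at h ⊢ <;> first | omega | simp_all)]
    simp

-- split a list at its K-th space
lemma exists_kth_space : ∀ (a : List Int) (K : Nat), 1 ≤ K →
    K ≤ a.countP (fun x => x == 32) →
    ∃ u w, a = u ++ 32 :: w ∧ u.countP (fun x => x == 32) = K - 1 := by
  intro a
  induction a with
  | nil => intro K hK h; simp at h; omega
  | cons x xs ih =>
    intro K hK h
    rw [List.countP_cons] at h
    by_cases hx : x = 32
    · subst hx
      by_cases hK1 : K = 1
      · exact ⟨[], xs, by simp, by simp [hK1]⟩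
      · obtain ⟨u, w, hw, hcnt⟩ := ih (K - 1) (by omega) (by simp at h; omega)
        exact ⟨32 :: u, w, by simp [hw], by rw [List.countP_cons]; simp; omega⟩
    · obtain ⟨u, w, hw, hcnt⟩ := ih K hK (by simp [hx] at h; omega)
      exact ⟨x :: u, w, by simp [hw], by rw [List.countP_cons]; simp [hx]; omega⟩

-- B with no cuts (k ≤ 0, or fewer than k spaces) returns [] on [] and [a] otherwise
lemma B_nocuts (a : List Int) (k : Int)
    (h : (if 0 < k then everyKth (spacesOf a) k else []) = []) :
    create_ascii_2d_array_alt a k = if a = [] then [] else [a] := by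
  simp only [create_ascii_2d_array_alt, h]
  rw [List.foldl_nil]
  rw [PySem.List.slice_from a le_rfl]
  cases a with
  | nil => simp
  | cons x xs => simp

-- B-side: base and recurrence for k ≥ 1
lemma B_base (a : List Int) (K : Nat) (hK : 1 ≤ K)
    (h : a.countP (fun x => x == 32) < K) :
    create_ascii_2d_array_alt a (K : Int) = if a = [] then [] else [a] := by
  apply B_nocuts
  rw [if_pos (by exact_mod_cast hK : (0:Int) < (K : Int))]
  exact everyKth_short _ _ (by rw [length_spacesOf]; exact_mod_cast h)

lemma B_rec (K : Nat) (hK : 1 ≤ K) (u w : List Int)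
    (hu : u.countP (fun x => x == 32) = K - 1) :
    create_ascii_2d_array_alt (u ++ 32 :: w) (K : Int)
      = (u ++ [32]) :: create_ascii_2d_array_alt w (K : Int) := by
  have hKpos : (0:Int) < (K : Int) := by exact_mod_cast hK
  have hlu : (spacesOf u).length = K - 1 := by rw [length_spacesOf, hu]
  have hsp : spacesOf (u ++ 32 :: w)
      = spacesOf u ++ ((u.length : Int) :: (spacesOf w).map (· + ((u.length : Int) + 1))) := by
    rw [spacesOf_append, spacesOf_cons]
    simp [List.map_map, Function.comp_def]
    intro i _
    ring
  have hcw : ∀ c ∈ everyKth (spacesOf w) (K : Int), 0 ≤ c :=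
    fun c hc => spacesOf_nonneg w c (everyKth_mem _ _ c hc)
  have hcuts : everyKth (spacesOf (u ++ 32 :: w)) (K : Int)
      = (u.length : Int) :: (everyKth (spacesOf w) (K : Int)).map (· + ((u.length : Int) + 1)) := by
    rw [hsp, everyKth_step _ _ hKpos (by simp [hlu]; omega)]
    congr 1
    · rw [show ((K : Int) - 1) = ((K - 1 : Nat) : Int) by omega, PySem.List.pyGetD_natCast,
          ← hlu]
      simp [List.getD]
    · rw [show ((K : Int)).toNat = (spacesOf u).length + 1 by omega,
          List.drop_length_add_append, List.drop_one, List.tail_cons]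
      exact everyKth_map_add (K : Int) ((u.length : Int) + 1) (spacesOf w)
  simp only [create_ascii_2d_array_alt]
  rw [if_pos hKpos, if_pos hKpos, hcuts]
  rw [List.foldl_cons]
  have hsl0 : PySem.List.slice (u ++ 32 :: w) (some 0) (some ((u.length : Int) + 1))
      = u ++ [32] := by
    rw [show ((u.length : Int) + 1) = ((u.length + 1 : Nat) : Int) by push_cast; ring,
        show (0:Int) = ((0:Nat) : Int) from rfl, PySem.List.slice_natCast]
    simp only [Nat.sub_zero, List.drop_zero]
    rw [List.take_length_add_append]
    simp
  have hstep0 : stepB (u ++ 32 :: w) (([] : List (List Int)), 0) (u.length : Int)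
      = ([u ++ [32]], (u.length : Int) + 1) := by
    simp only [stepB, hsl0]
    simp
  rw [hstep0]
  have hplen : ((u.length : Int) + 1) = (((u ++ [32]).length : Int)) := by simp
  have ha : u ++ 32 :: w = (u ++ [32]) ++ w := by simp
  rw [hplen, foldB_acc, ha, foldB_shift0 (u ++ [32]) w _ hcw]
  have ho0 : 0 ≤ ((everyKth (spacesOf w) (K : Int)).foldl (stepB w) ([], 0)).2 :=
    foldB_old_nonneg _ w [] 0 le_rfl hcw
  have hn : (((u ++ [32]) ++ w).length : Int) = ((u ++ [32]).length : Int) + (w.length : Int) := by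
    simp only [List.length_append, List.length_cons, List.length_nil]
    push_cast
    ring
  have hsl : ∀ o : Int, 0 ≤ o →
      PySem.List.slice ((u ++ [32]) ++ w) (some (((u ++ [32]).length : Int) + o)) none
        = PySem.List.slice w (some o) none := by
    intro o ho
    rw [PySem.List.slice_from _ (by omega), PySem.List.slice_from w ho]
    have ht : (((u ++ [32]).length : Int) + o).toNat = (u ++ [32]).length + o.toNat := by omega
    rw [ht, List.drop_length_add_append]
  by_cases hlt : ((everyKth (spacesOf w) (K : Int)).foldl (stepB w) ([], 0)).2 < (w.length : Int)
  · rw [if_pos (by rw [hn]; omega), if_pos hlt, hsl _ ho0]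
    simp
  · rw [if_neg (by rw [hn]; omega), if_neg hlt]
    simp

lemma main_pos (K : Nat) (hK : 1 ≤ K) : ∀ (n : Nat) (a : List Int), a.length ≤ n →
    goA (K : Int) a [] 0 = create_ascii_2d_array_alt a (K : Int) := by
  intro n
  induction n with
  | zero =>
    intro a ha
    have : a = [] := List.eq_nil_of_length_eq_zero (by omega)
    subst this
    rw [B_base [] K hK (by simp; omega)]
    simp [goA]
  | succ n ih =>
    intro a ha
    by_cases hcnt : a.countP (fun x => x == 32) < K
    · rw [goA_nocut (K : Int) a [] 0 (Or.inr (by omega))]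
      rw [B_base a K hK hcnt]
      cases a <;> simp
    · obtain ⟨u, w, rfl, hu⟩ := exists_kth_space a K hK (by omega)
      rw [goA_cut (K : Int) u w [] 0 (by rw [hu]; push_cast [hK]; omega)]
      rw [B_rec K hK u w hu]
      rw [ih w (by simp at ha; omega)]
      simp

lemma goA_cons (k x : Int) (xs pend : List Int) (cnt : Int) :
    goA k (x :: xs) pend cnt =
      if (if x = 32 then cnt + 1 else cnt) = k ∨ xs = []
      then (pend ++ [x]) :: goA k xs [] 0
      else goA k xs (pend ++ [x]) (if x = 32 then cnt + 1 else cnt) := rfl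

lemma main_neg (a : List Int) (k : Int) (hk : k < 0) :
    goA k a [] 0 = create_ascii_2d_array_alt a k := by
  rw [goA_nocut k a [] 0 (Or.inl (by omega))]
  rw [B_nocuts a k (by rw [if_neg (by omega)])]
  simp

lemma main_zero (a : List Int) (hnD : ¬ D_create_ascii_2d_array a 0) :
    goA 0 a [] 0 = create_ascii_2d_array_alt a 0 := by
  rw [B_nocuts a 0 (by rw [if_neg (by omega)])]
  unfold D_create_ascii_2d_array at hnD
  push_neg at hnD
  cases a with
  | nil => simp [goA]
  | cons x xs =>
    cases xs with
    | nil =>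
      rw [goA_cons]
      rw [if_pos (Or.inr rfl)]
      simp [goA]
    | cons y ys =>
      have hx : x = 32 := by
        by_contra hx
        have := hnD rfl (by simp)
        simp at this
        exact hx this
      subst hx
      rw [goA_cons, if_neg (by simp)]
      rw [goA_nocut 0 (y :: ys) ([] ++ [32]) (if (32:Int) = 32 then 0 + 1 else 0) (Or.inl (by norm_num))]
      simp

-- ===== VERDICT (by name: the statement is the Claim_ definition above) =====
theorem create_ascii_2d_array_spec : Claim_unchanged_create_ascii_2d_array := by
  intro a k _ hnD
  rw [A_eq_goA]
  rcases lt_trichotomy k 0 with hk | hk | hk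
  · exact main_neg a k hk
  · subst hk; exact main_zero a hnD
  · have hK : k = ((k.toNat : Nat) : Int) := by omega
    rw [hK]
    rw [hK] at hnD
    exact main_pos k.toNat (by omega) a.length a le_rfl

theorem create_ascii_2d_array_changed : Claim_changed_create_ascii_2d_array := by
  unfold Claim_changed_create_ascii_2d_array; decide

theorem create_ascii_2d_array_tight : Claim_exact_create_ascii_2d_array := by
  intro a k _ hD
  obtain ⟨rfl, hlen, hhd⟩ := hD
  match a, hlen with
  | x :: y :: ys, _ =>
    have hx : x ≠ 32 := by simpa using hhd
    rw [A_eq_goA, B_nocuts _ 0 (by rw [if_neg (by omega)])]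
    rw [goA_cons, if_pos (Or.inl (by simp [hx]))]
    rw [if_neg (by simp)]
    intro h
    have := (List.cons.injEq _ _ _ _).mp h
    obtain ⟨h1, -⟩ := this
    simp at h1
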